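-- pv_equiv track=rewrite | github.com/6reg/pc_func_fun | aba7.py | aba
-- ===== SOURCE A (Python) =====
-- s = "Cats and Dogs"
--
-- def aba(s):
--     r = ""
--     v = "aeiouAEIOU"
--     for ch in s:
--         if ch in v:
--             r += ch + "aba" + ch.lower()
--         else:
--             r += ch
--     return r
-- ===== SOURCE B (Python) =====
-- def aba(s):
--     vowels = "aeiouAEIOU"
--     parts = []
--     start = 0
--     for j, ch in enumerate(s):
--         if ch in vowels:
--             parts.append(s[start:j + 1])
--             parts.append("aba" + ch.lower())
--             start = j + 1
--     parts.append(s[start:])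
--     return "".join(parts)
-- ===== Notes on version B (the rewrite author's own statement) =====
-- stated objective: alternative
-- what changed: Instead of mapping every character through an if/else and appending per character, B scans for vowel positions with enumerate, copies the untouched text between consecutive vowels as whole slices, appends the injected expansion piece at each vowel, and joins the collected pieces once at the end.
import Mathlib
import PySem

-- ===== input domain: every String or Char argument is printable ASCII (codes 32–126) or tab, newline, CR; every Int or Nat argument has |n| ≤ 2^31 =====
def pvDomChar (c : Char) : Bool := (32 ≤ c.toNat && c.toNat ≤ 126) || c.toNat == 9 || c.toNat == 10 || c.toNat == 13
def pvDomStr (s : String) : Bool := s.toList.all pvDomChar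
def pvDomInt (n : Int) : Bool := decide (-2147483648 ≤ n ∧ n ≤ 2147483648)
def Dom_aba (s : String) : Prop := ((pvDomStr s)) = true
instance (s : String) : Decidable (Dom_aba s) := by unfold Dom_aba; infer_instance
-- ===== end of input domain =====

-- B replaces A's per-character map-and-append loop by a scan for vowel positions that copies the runs between vowels as whole slices and joins the pieces once; alternative decomposition, same result.

-- ===== PORT A =====
-- strings handled on the List Char side (PySem convention); r += x is list append on the accumulator
def aba (s : String) : String :=
  String.mk (s.toList.foldl
    (fun r ch =>
      if ch ∈ "aeiouAEIOU".toList then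
        r ++ (ch :: 'a' :: 'b' :: 'a' :: [PySem.Chars.lowerChar ch])
      else
        r ++ [ch])
    [])

-- ===== PORT B =====
-- enumerate-driven scan: state = (parts, start); at each vowel append the slice s[start:j+1]
-- and the injected piece "aba"+ch.lower(), set start := j+1; finally append s[start:] and join
def aba_alt (s : String) : String :=
  let l := s.toList
  let st := (PySem.List.enumerate l 0).foldl
    (fun (acc : List (List Char) × Int) p =>
      if p.2 ∈ "aeiouAEIOU".toList then
        (acc.1 ++ [PySem.List.slice l (some acc.2) (some (p.1 + 1)),
                   'a' :: 'b' :: 'a' :: [PySem.Chars.lowerChar p.2]], p.1 + 1)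
      else acc)
    ([], 0)
  String.mk ((st.1 ++ [PySem.List.slice l (some st.2) none]).flatten)

-- ===== PRECONDITION & SPEC =====
def Spec_aba (s : String) (out : String) : Prop := out = aba_alt s
instance (s : String) (out : String) : Decidable (Spec_aba s out) := by unfold Spec_aba; infer_instance

-- ===== CLAIM (what is proved, stated in full; the proofs are below) =====
def Claim_equal_aba : Prop := ∀ (s : String), Dom_aba s → Spec_aba s (aba s)

-- ===== LEMMAS AND PROOFS =====

-- the per-character expansion both programs realise
def abaG (ch : Char) : List Char :=
  if ch ∈ "aeiouAEIOU".toList then ch :: 'a' :: 'b' :: 'a' :: [PySem.Chars.lowerChar ch] else [ch]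

theorem aba_eq_flatMap (s : String) : aba s = String.mk (s.toList.flatMap abaG) := by
  unfold aba
  congr 1
  have hbody : ∀ (r : List Char) (ch : Char),
      (if ch ∈ "aeiouAEIOU".toList then r ++ (ch :: 'a' :: 'b' :: 'a' :: [PySem.Chars.lowerChar ch])
       else r ++ [ch]) = r ++ abaG ch := by
    intro r ch; unfold abaG; split <;> rfl
  simp only [hbody]
  simpa using PySem.List.foldl_append_eq_flatMap abaG s.toList []

theorem abaG_pos (ch : Char) (h : ch ∈ "aeiouAEIOU".toList) :
    abaG ch = ch :: 'a' :: 'b' :: 'a' :: [PySem.Chars.lowerChar ch] := by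
  unfold abaG; rw [if_pos h]

theorem abaG_neg (ch : Char) (h : ch ∉ "aeiouAEIOU".toList) : abaG ch = [ch] := by
  unfold abaG; rw [if_neg h]

-- one step of the pending run: taking one more character off l.drop i
theorem take_succ_drop (l : List Char) (i s : Nat) (ch : Char) (t : List Char)
    (hi : i ≤ s) (ht : l.drop s = ch :: t) :
    (l.drop i).take (s - i + 1) = (l.drop i).take (s - i) ++ [ch] := by
  have hg : l[s]? = some ch := by
    have h0 : (l.drop s)[0]? = some ch := by rw [ht]; rfl
    simpa [List.getElem?_drop] using h0
  have hget : (l.drop i)[s - i]? = some ch := by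
    rw [List.getElem?_drop]
    have h2 : i + (s - i) = s := by omega
    rw [h2, hg]
  rw [List.take_succ, hget]; rfl

-- loop invariant for B's scan
theorem aba_scan (l : List Char) :
    ∀ (t : List Char) (s i : Nat) (parts : List (List Char)),
      i ≤ s → l.drop s = t →
      (let r := (PySem.List.enumerate t (s : Int)).foldl
        (fun (acc : List (List Char) × Int) p =>
          if p.2 ∈ "aeiouAEIOU".toList then
            (acc.1 ++ [PySem.List.slice l (some acc.2) (some (p.1 + 1)),
                       'a' :: 'b' :: 'a' :: [PySem.Chars.lowerChar p.2]], p.1 + 1)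
          else acc)
        (parts, (i : Int))
       r.1.flatten ++ PySem.List.slice l (some r.2) none
         = parts.flatten ++ (l.drop i).take (s - i) ++ t.flatMap abaG) := by
  intro t
  induction t with
  | nil =>
    intro s i parts hi ht
    simp only [PySem.List.enumerate_nil, List.foldl_nil]
    have hlen : l.length ≤ s := by
      by_contra h
      have := List.drop_eq_nil_iff.mp ht
      omega
    have hdrop : (l.drop i).take (s - i) = l.drop i := by
      apply List.take_of_length_le
      simp
      omega
    simp [PySem.List.slice_from_natCast, hdrop]
  | cons ch t ih =>
    intro s i parts hi ht
    rw [PySem.List.enumerate_cons, List.foldl_cons]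
    have hs1 : ((s : Int) + 1) = ((s + 1 : Nat) : Int) := by push_cast; ring
    have ht' : l.drop (s + 1) = t := by
      have h1 := congrArg (List.drop 1) ht
      simpa [List.drop_drop, Nat.add_comm] using h1
    have hst : (l.drop i).take (s + 1 - i) = (l.drop i).take (s - i) ++ [ch] := by
      have he : s + 1 - i = s - i + 1 := by omega
      rw [he]; exact take_succ_drop l i s ch t hi ht
    by_cases hv : ch ∈ "aeiouAEIOU".toList
    · rw [if_pos hv]
      have key := ih (s + 1) (s + 1)
        (parts ++ [PySem.List.slice l (some (i : Int)) (some ((s : Int) + 1)),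
                   'a' :: 'b' :: 'a' :: [PySem.Chars.lowerChar ch]])
        (le_refl _) ht'
      simp only [hs1] at key ⊢
      rw [key]
      have hslice : PySem.List.slice l (some ((i : Nat) : Int)) (some (((s + 1 : Nat) : Nat) : Int))
          = (l.drop i).take (s + 1 - i) := by
        rw [PySem.List.slice_natCast]
      rw [List.flatMap_cons, abaG_pos ch hv, hslice, hst]
      simp only [List.flatten_append, List.flatten_cons, List.flatten_nil, List.append_nil, List.append_assoc, Nat.sub_self, List.take_zero, List.nil_append]
      rfl
    · rw [if_neg hv]
      have key := ih (s + 1) i parts (by omega) ht'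
      simp only [hs1] at key ⊢
      rw [key, hst, List.flatMap_cons, abaG_neg ch hv]
      simp only [List.flatten_append, List.flatten_cons, List.flatten_nil, List.append_nil, List.append_assoc]

-- ===== VERDICT (by name: the statement is the Claim_ definition above) =====
theorem aba_spec : Claim_equal_aba := by
  intro s _
  unfold Spec_aba aba_alt
  rw [aba_eq_flatMap]
  have h := aba_scan s.toList s.toList 0 0 [] (le_refl 0) rfl
  simp only [Nat.cast_zero] at h
  congr 1
  rw [List.flatten_append]
  simp only [List.flatten_cons, List.flatten_nil, List.append_nil] at *
  simpa using h.symm
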